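-- pv_equiv track=rewrite | github.com/mqcomplab/MDANCE | src/mdance/cluster/shine.py | group_consecutive_indices
-- ===== SOURCE A (Python) =====
-- def group_consecutive_indices(indices):
--     """
--     Group consecutive indices into ranges for ``labels`` method
--
--     Parameters
--     ----------
--     indices : list
--         List of indices to group
--
--     Returns
--     -------
--     str
--         Grouped indices as a string
--     """
--     indices = sorted(indices)
--     result = []
--     start = indices[0]
--     end = indices[0]
--
--     for i in range(1, len(indices)):
--         if indices[i] == end + 1:
--             end = indices[i]
--         else:
--             if start == end:
--                 result.append(f"{start}")
--             else:
--                 result.append(f"{start}-{end}")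
--             start = indices[i]
--             end = indices[i]
--     if start == end:
--         result.append(f"{start}")
--     else:
--         result.append(f"{start}-{end}")
--     return ", ".join(result)
-- ===== SOURCE B (Python) =====
-- def group_consecutive_indices(indices):
--     """Boundary-based re-implementation: compute run break positions first,
--     then format each [a, b) slice of the sorted list."""
--     xs = sorted(indices)
--     n = len(xs)
--     breaks = [i for i in range(1, n) if xs[i] != xs[i - 1] + 1]
--     bounds = [0] + breaks + [n]
--     parts = []
--     for a, b in zip(bounds, bounds[1:]):
--         first, last = xs[a], xs[b - 1]
--         parts.append(str(first) if first == last else f"{first}-{last}")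
--     return ", ".join(parts)
-- ===== Notes on version B (the rewrite author's own statement) =====
-- stated objective: alternative
-- what changed: Replaces A's single stateful start/end fold with a two-phase boundary method: a comprehension collects the positions where consecutiveness breaks, then each adjacent bounds pair is formatted directly from the sorted list.
import Mathlib
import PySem

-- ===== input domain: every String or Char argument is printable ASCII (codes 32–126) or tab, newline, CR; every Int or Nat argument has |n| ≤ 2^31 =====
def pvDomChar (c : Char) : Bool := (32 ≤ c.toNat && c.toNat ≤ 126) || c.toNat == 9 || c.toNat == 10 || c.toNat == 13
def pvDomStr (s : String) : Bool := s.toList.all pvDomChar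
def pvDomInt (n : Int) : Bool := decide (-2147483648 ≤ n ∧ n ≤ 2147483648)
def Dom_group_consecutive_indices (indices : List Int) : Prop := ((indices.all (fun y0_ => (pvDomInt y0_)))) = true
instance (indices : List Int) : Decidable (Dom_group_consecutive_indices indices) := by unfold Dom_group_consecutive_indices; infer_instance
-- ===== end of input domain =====

-- B replaces A's stateful start/end fold by a two-phase boundary method (collect break
-- positions, then format each bounds pair); same cost, alternative structure.

-- ===== PORT A =====
def group_consecutive_indices (indices : List Int) : String :=
  let xs := PySem.List.sorted indices (fun x => x) false
  -- start = indices[0]; end = indices[0]  (IndexError on [] — excluded by Pre_)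
  let s0 := PySem.List.pyGetD xs 0 0
  let st := (PySem.List.pyRange 1 (xs.length : Int) 1).foldl
    (fun (acc : List String × Int × Int) i =>
      let v := PySem.List.pyGetD xs i 0
      if v = acc.2.2 + 1 then (acc.1, acc.2.1, v)
      else (acc.1 ++ [if acc.2.1 = acc.2.2 then PySem.Int.toStr acc.2.1
            else PySem.Int.toStr acc.2.1 ++ "-" ++ PySem.Int.toStr acc.2.2], v, v))
    (([] : List String), s0, s0)
  PySem.Str.join ", " (st.1 ++ [if st.2.1 = st.2.2 then PySem.Int.toStr st.2.1
      else PySem.Int.toStr st.2.1 ++ "-" ++ PySem.Int.toStr st.2.2])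

-- ===== PORT B =====
def group_consecutive_indices_alt (indices : List Int) : String :=
  let xs := PySem.List.sorted indices (fun x => x) false
  let n : Int := xs.length
  let breaks := (PySem.List.pyRange 1 n 1).filter
    (fun i => decide (PySem.List.pyGetD xs i 0 ≠ PySem.List.pyGetD xs (i - 1) 0 + 1))
  let bounds := 0 :: (breaks ++ [n])
  let parts := (bounds.zip bounds.tail).map (fun ab =>
    let first := PySem.List.pyGetD xs ab.1 0
    let last := PySem.List.pyGetD xs (ab.2 - 1) 0
    if first = last then PySem.Int.toStr first
    else PySem.Int.toStr first ++ "-" ++ PySem.Int.toStr last)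
  PySem.Str.join ", " parts

-- ===== PRECONDITION & SPEC =====
-- Pre_ excludes only the empty list, on which A (indices[0]) raises IndexError.
def Pre_group_consecutive_indices (indices : List Int) : Prop := indices ≠ []
instance (indices : List Int) : Decidable (Pre_group_consecutive_indices indices) := by
  unfold Pre_group_consecutive_indices; infer_instance

def pvWitness_group_consecutive_indices : List Int := [3, 1, 2, 7]

def Spec_group_consecutive_indices (indices : List Int) (out : String) : Prop :=
  out = group_consecutive_indices_alt indices
instance (indices : List Int) (out : String) : Decidable (Spec_group_consecutive_indices indices out) := by
  unfold Spec_group_consecutive_indices; infer_instance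

-- ===== CLAIM =====
def Claim_equal_group_consecutive_indices : Prop := ∀ (indices : List Int),
  Dom_group_consecutive_indices indices → Pre_group_consecutive_indices indices →
  Spec_group_consecutive_indices indices (group_consecutive_indices indices)

-- ===== LEMMAS AND PROOFS =====

/-- Formatting of one run (shared shape of both f-strings). -/
def pvFmt (s e : Int) : String :=
  if s = e then PySem.Int.toStr s else PySem.Int.toStr s ++ "-" ++ PySem.Int.toStr e

/-- Reference list of runs of a list, starting from a current run `(s, e)`. -/
def pvRuns (s e : Int) : List Int → List (Int × Int)
  | [] => [(s, e)]
  | v :: t => if v = e + 1 then pvRuns s v t else (s, e) :: pvRuns v v t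

/-- A's loop body, on the element rather than the index. -/
def pvStepA (acc : List String × Int × Int) (v : Int) : List String × Int × Int :=
  if v = acc.2.2 + 1 then (acc.1, acc.2.1, v)
  else (acc.1 ++ [pvFmt acc.2.1 acc.2.2], v, v)

/-- Gap positions of B: `k` lists gap `k` (between `xs[k]` and `xs[k+1]`) iff it breaks. -/
def pvBrks (xs : List Int) : List Nat :=
  (List.range (xs.length - 1)).filter (fun k => decide (xs.getD (k + 1) 0 ≠ xs.getD k 0 + 1))

/-- B's parts, recursively over the gap list: run `[s, …, xs[k]]`, next run starts at `k+1`. -/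
def pvBuild (xs : List Int) (s : Int) : List Nat → List String
  | [] => [pvFmt s (xs.getD (xs.length - 1) 0)]
  | k :: bs => pvFmt s (xs.getD k 0) :: pvBuild xs (xs.getD (k + 1) 0) bs

theorem pvFoldA (t : List Int) : ∀ (r : List String) (s e : Int),
    (t.foldl pvStepA (r, s, e)).1 ++ [pvFmt (t.foldl pvStepA (r, s, e)).2.1 (t.foldl pvStepA (r, s, e)).2.2]
      = r ++ (pvRuns s e t).map (fun p => pvFmt p.1 p.2) := by
  induction t with
  | nil => intro r s e; simp [pvRuns]
  | cons v t ih =>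
    intro r s e
    by_cases h : v = e + 1 <;>
      simp [pvStepA, pvRuns, h, ih]

theorem pvBrks_cons_cons (y v : Int) (t : List Int) :
    pvBrks (y :: v :: t) =
      (if v = y + 1 then ([] : List Nat) else [0]) ++ (pvBrks (v :: t)).map (· + 1) := by
  unfold pvBrks
  simp only [List.length_cons]
  rw [show (t.length + 1 + 1 - 1) = t.length + 1 by omega,
      List.range_succ_eq_map, List.filter_cons, List.filter_map]
  by_cases h : v = y + 1 <;>
    · simp [h, Function.comp_def]
      rfl

theorem pvBuild_shift (bs : List Nat) : ∀ (x s : Int) (xs : List Int), xs ≠ [] →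
    pvBuild (x :: xs) s (bs.map (· + 1)) = pvBuild xs s bs := by
  induction bs with
  | nil =>
    intro x s xs hne
    obtain ⟨m, hm⟩ : ∃ m, xs.length = m + 1 :=
      ⟨xs.length - 1, by cases xs <;> simp_all⟩
    simp [pvBuild, hm]
  | cons k bs ih =>
    intro x s xs hne
    simp [pvBuild, ih _ _ _ hne]

theorem pvBuild_eq_runs (t : List Int) : ∀ (y s : Int),
    pvBuild (y :: t) s (pvBrks (y :: t)) = (pvRuns s y t).map (fun p => pvFmt p.1 p.2) := by
  induction t with
  | nil => intro y s; simp [pvBrks, pvBuild, pvRuns]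
  | cons v t ih =>
    intro y s
    rw [pvBrks_cons_cons]
    by_cases h : v = y + 1
    · rw [if_pos h]
      simp only [List.nil_append]
      rw [pvBuild_shift _ _ _ _ (by simp), ih v s]
      simp [pvRuns, h]
    · rw [if_neg h]
      simp only [List.cons_append, List.nil_append, pvBuild]
      rw [pvBuild_shift _ _ _ _ (by simp), show ((y :: v :: t).getD 0 0) = y from rfl,
          show ((y :: v :: t).getD 1 0) = v from rfl, ih v v]
      simp [pvRuns, h]

theorem pvBreaks_eq (xs : List Int) :
    (PySem.List.pyRange 1 (xs.length : Int) 1).filter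
      (fun i => decide (PySem.List.pyGetD xs i 0 ≠ PySem.List.pyGetD xs (i - 1) 0 + 1))
    = (pvBrks xs).map (fun (k : Nat) => (k : Int) + 1) := by
  rw [PySem.List.pyRange_one, List.filter_map]
  unfold pvBrks
  rw [show ((xs.length : Int) - 1).toNat = xs.length - 1 by omega]
  rw [List.filter_congr (fun k hk => by
    simp only [Function.comp_def,
      show (1 : Int) + (k : Int) = ((k + 1 : Nat) : Int) by push_cast; ring,
      show (((k + 1 : Nat) : Int)) - 1 = ((k : Nat) : Int) by push_cast; ring,
      PySem.List.pyGetD_natCast]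
    rfl)]
  exact List.map_congr_left (fun k _ => by ring)

theorem pvZipParts (xs : List Int) (hne : xs ≠ []) : ∀ (bs : List Nat) (a : Nat),
    ((((a : Int) :: (bs.map (fun (k : Nat) => (k : Int) + 1) ++ [(xs.length : Int)])).zip
        (bs.map (fun (k : Nat) => (k : Int) + 1) ++ [(xs.length : Int)])).map (fun ab =>
      pvFmt (PySem.List.pyGetD xs ab.1 0) (PySem.List.pyGetD xs (ab.2 - 1) 0)))
    = pvBuild xs (xs.getD a 0) bs := by
  intro bs
  induction bs with
  | nil =>
    intro a
    have h1 : ((xs.length : Int)) - 1 = ((xs.length - 1 : Nat) : Int) := by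
      cases xs with
      | nil => exact absurd rfl hne
      | cons x l => push_cast [List.length_cons]; ring
    simp [pvBuild, h1]
  | cons k bs ih =>
    intro a
    have h2 : ((k : Int) + 1) - 1 = ((k : Nat) : Int) := by ring
    simp only [List.map_cons, List.cons_append, List.zip_cons_cons, h2,
      PySem.List.pyGetD_natCast]
    rw [show ((k : Int) + 1) = ((k + 1 : Nat) : Int) by push_cast; ring]
    rw [pvBuild]
    exact congrArg _ (ih (k + 1))

-- ===== VERDICT =====
theorem group_consecutive_indices_spec : Claim_equal_group_consecutive_indices := by
  intro indices _ hpre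
  unfold Spec_group_consecutive_indices group_consecutive_indices group_consecutive_indices_alt
  have hys : PySem.List.sorted indices (fun x => x) false ≠ [] := by
    simpa [PySem.List.sorted_eq_nil_iff] using hpre
  obtain ⟨y, t, hyt⟩ := List.exists_cons_of_ne_nil hys
  simp only [hyt]
  -- A side
  rw [show (PySem.List.pyRange 1 ((y :: t).length : Int) 1).foldl
      (fun (acc : List String × Int × Int) i =>
        let v := PySem.List.pyGetD (y :: t) i 0
        if v = acc.2.2 + 1 then (acc.1, acc.2.1, v)
        else (acc.1 ++ [if acc.2.1 = acc.2.2 then PySem.Int.toStr acc.2.1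
              else PySem.Int.toStr acc.2.1 ++ "-" ++ PySem.Int.toStr acc.2.2], v, v))
      (([] : List String), PySem.List.pyGetD (y :: t) 0 0, PySem.List.pyGetD (y :: t) 0 0)
    = (List.drop (1 : Int).toNat (y :: t)).foldl pvStepA
        (([] : List String), PySem.List.pyGetD (y :: t) 0 0, PySem.List.pyGetD (y :: t) 0 0)
    from PySem.List.foldl_pyRange_pyGetD' (y :: t) 0 pvStepA _ (by norm_num)]
  simp only [PySem.List.pyGetD_zero_cons, show List.drop (1 : Int).toNat (y :: t) = t from rfl]
  rw [pvBreaks_eq (y :: t)]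
  refine Eq.trans (b := PySem.Str.join ", " ((pvRuns y y t).map (fun p => pvFmt p.1 p.2))) ?_ ?_
  · exact congrArg _ (pvFoldA t [] y y)
  · exact (congrArg _ ((pvZipParts (y :: t) (by simp) (pvBrks (y :: t)) 0).trans
      (pvBuild_eq_runs t y y))).symm
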